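-- pv_equiv track=rewrite | github.com/Ishaan28malik/Hacktoberfest-2024 | Mini-Projects/Python/Pixel Morse/solve.py | extractOffset
-- ===== SOURCE A (Python) =====
-- def extractOffset(pixel_array: list)-> str:
--     a, b= [0, 0]
--     out = []
--     for i in pixel_array:
--         if i:
--             out.append(b - a+1)
--             a = b
--         else:
--             b+=1
--     return out
-- ===== SOURCE B (Python) =====
-- def extractOffset(pixel_array: list) -> list:
--     idx = [i for i, v in enumerate(pixel_array) if v]
--     out = []
--     prev = -1
--     for i in idx:
--         out.append(i - prev)
--         prev = i
--     return out
-- ===== Notes on version B (the rewrite author's own statement) =====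
-- stated objective: simpler
-- what changed: B first materialises the list of truthy-pixel indices and then emits successive index gaps (prev = -1), instead of A's scan that maintains two running falsy counters a and b.
import Mathlib
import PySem

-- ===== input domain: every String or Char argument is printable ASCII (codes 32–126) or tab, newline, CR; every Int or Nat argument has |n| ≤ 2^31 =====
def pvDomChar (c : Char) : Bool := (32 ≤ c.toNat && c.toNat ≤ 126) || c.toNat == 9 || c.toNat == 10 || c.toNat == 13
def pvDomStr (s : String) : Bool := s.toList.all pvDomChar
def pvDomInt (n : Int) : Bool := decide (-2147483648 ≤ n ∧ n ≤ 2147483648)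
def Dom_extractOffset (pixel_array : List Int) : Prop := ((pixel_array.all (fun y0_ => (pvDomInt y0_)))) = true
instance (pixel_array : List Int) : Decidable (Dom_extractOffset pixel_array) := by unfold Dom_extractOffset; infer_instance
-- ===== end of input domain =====

-- B builds the truthy-index list first and then emits successive index gaps (prev = -1),
-- instead of A's scan with two running falsy counters; objective: simpler decomposition.

-- ===== PORT A =====
-- state (a, b, out); `if i:` on an int means i ≠ 0
def extractOffset (pixel_array : List Int) : List Int :=
  (pixel_array.foldl
    (fun (s : Int × Int × List Int) i =>
      if i ≠ 0 then (s.2.1, s.2.1, s.2.2 ++ [s.2.1 - s.1 + 1])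
      else (s.1, s.2.1 + 1, s.2.2))
    (0, 0, [])).2.2

-- ===== PORT B =====
def extractOffset_alt (pixel_array : List Int) : List Int :=
  let idx := ((PySem.List.enumerate pixel_array).filter (fun p => p.2 ≠ 0)).map (fun p => p.1)
  (idx.foldl (fun (s : Int × List Int) i => (i, s.2 ++ [i - s.1])) (-1, [])).2

-- ===== PRECONDITION & SPEC =====
def Spec_extractOffset (pixel_array : List Int) (out : List Int) : Prop := out = extractOffset_alt pixel_array
instance (pixel_array : List Int) (out : List Int) : Decidable (Spec_extractOffset pixel_array out) := by unfold Spec_extractOffset; infer_instance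

-- ===== CLAIM (what is proved, stated in full; the proofs are below) =====
def Claim_equal_extractOffset : Prop := ∀ (pixel_array : List Int), Dom_extractOffset pixel_array → Spec_extractOffset pixel_array (extractOffset pixel_array)

-- ===== LEMMAS AND PROOFS =====

-- Invariant linking A's counters (a, b) after a prefix to B's previous-index prev and the
-- enumeration start n: b - a = n - prev - 1 (the next appended values b-a+1 and i-prev then agree).
theorem extractOffset_fold_eq (l : List Int) : ∀ (n a b prev : Int) (out : List Int),
    b - a = n - prev - 1 →
    (l.foldl
      (fun (s : Int × Int × List Int) i =>
        if i ≠ 0 then (s.2.1, s.2.1, s.2.2 ++ [s.2.1 - s.1 + 1])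
        else (s.1, s.2.1 + 1, s.2.2))
      (a, b, out)).2.2 =
    ((((PySem.List.enumerate l n).filter (fun p => p.2 ≠ 0)).map (fun p => p.1)).foldl
      (fun (s : Int × List Int) i => (i, s.2 ++ [i - s.1])) (prev, out)).2 := by
  induction l with
  | nil => intro n a b prev out h; simp [PySem.List.enumerate_nil]
  | cons v t ih =>
    intro n a b prev out h
    by_cases hv : v ≠ 0
    · simp only [List.foldl_cons, PySem.List.enumerate_cons, List.filter_cons]
      rw [if_pos hv, if_pos (by simpa using hv)]
      simp only [List.map_cons, List.foldl_cons]
      rw [show (n : Int) - prev = b - a + 1 by omega]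
      exact ih (n + 1) b b n (out ++ [b - a + 1]) (by omega)
    · simp only [List.foldl_cons, PySem.List.enumerate_cons, List.filter_cons]
      rw [if_neg hv, if_neg (by simpa using hv)]
      exact ih (n + 1) a (b + 1) prev out (by omega)

-- ===== VERDICT (by name: the statement is the Claim_ definition above) =====
theorem extractOffset_spec : Claim_equal_extractOffset := by
  intro pixel_array _
  unfold Spec_extractOffset extractOffset extractOffset_alt
  exact extractOffset_fold_eq pixel_array 0 0 0 (-1) [] (by omega)
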